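-- pv_equiv track=rewrite | github.com/kernd/py-espn-fantasy | src/espn_fantasy/scores.py | filter_participants
-- ===== SOURCE A (Python) =====
-- def filter_participants(results, participant_names):
--     """Filter results to only include weekly pot participants."""
--     # Participant names are already normalized to lowercase in the Pydantic model
--     # Just strip whitespace for comparison
--     normalized_participants = {name.strip() for name in participant_names}
--
--     filtered = []
--     for result in results:
--         # Check both full name and display name
--         owner_full = result.get("owner_full", "").strip().lower()
--         owner_display = result.get("owner", "").strip().lower()
--
--         # Match if either full name or display name exactly matches or contains a participant name
--         # We check both directions: participant in owner name, and owner name in participant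
--         matches = False
--         for participant in normalized_participants:
--             # Exact match or participant name is contained in owner name
--             if (
--                 participant == owner_full
--                 or participant == owner_display
--                 or participant in owner_full
--                 or participant in owner_display
--             ):
--                 matches = True
--                 break
--
--         if matches:
--             filtered.append(result)
--
--     return filtered
-- ===== SOURCE B (Python) =====
-- def filter_participants(results, participant_names):
--     """Hash-index multi-pattern match: instead of scanning the participant list
--     per result, look up each owner substring (restricted to the needle lengths)
--     in a set of stripped participant names."""
--     needles = {name.strip() for name in participant_names}
--     lengths = {len(p) for p in needles}
--
--     def hits(owner):
--         return any(owner[i:i + l] in needles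
--                    for i in range(len(owner) + 1) for l in lengths)
--
--     def matches(result):
--         return (hits(result.get("owner_full", "").strip().lower())
--                 or hits(result.get("owner", "").strip().lower()))
--
--     return [r for r in results if matches(r)]
-- ===== Notes on version B (the rewrite author's own statement) =====
-- stated objective: faster
-- what changed: A's per-result inner scan over the participant list is replaced by a hash-index lookup: B builds a set of stripped needles and the set of their lengths once, then for each owner string looks each substring of a needle length up in the needle set, so the scan over participants disappears (the redundant exact-equality tests too, being subsumed by containment).
import Mathlib
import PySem

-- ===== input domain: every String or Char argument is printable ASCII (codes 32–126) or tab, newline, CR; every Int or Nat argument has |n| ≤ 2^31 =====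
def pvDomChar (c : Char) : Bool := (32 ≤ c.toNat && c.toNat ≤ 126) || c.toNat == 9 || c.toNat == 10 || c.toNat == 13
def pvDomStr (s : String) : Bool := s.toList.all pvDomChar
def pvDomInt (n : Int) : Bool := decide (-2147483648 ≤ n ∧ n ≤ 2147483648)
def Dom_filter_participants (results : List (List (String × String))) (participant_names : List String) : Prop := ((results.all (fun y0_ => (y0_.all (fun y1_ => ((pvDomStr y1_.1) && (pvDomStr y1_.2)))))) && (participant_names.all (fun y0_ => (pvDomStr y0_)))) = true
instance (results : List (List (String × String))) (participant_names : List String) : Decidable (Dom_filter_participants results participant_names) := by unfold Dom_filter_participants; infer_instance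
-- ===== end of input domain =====

-- B replaces A's per-result scan over the participant list by a hash-index lookup:
-- owner substrings (restricted to the set of needle lengths) are looked up in a set
-- of the stripped participant names (objective: alternative algorithm).

-- shared helper: dict.get(k, "") on the association list (first match)
def pvGetD (r : List (String × String)) (k : String) : String :=
  match r.find? (fun p => p.1 == k) with
  | some p => p.2
  | none => ""

-- ===== PORT A =====
-- inner `for participant in normalized_participants: … break` loop
def pvAMatch (ownerFull ownerDisplay : String) : List String → Bool
  | [] => false
  | p :: rest =>
      if p == ownerFull || p == ownerDisplay ||
         PySem.Str.isIn p ownerFull || PySem.Str.isIn p ownerDisplay then true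
      else pvAMatch ownerFull ownerDisplay rest

def filter_participants (results : List (List (String × String))) (participant_names : List String) : List (List (String × String)) :=
  let normalizedParticipants := PySem.Set.ofList (participant_names.map (fun name => PySem.Str.strip name))
  results.foldl (fun filtered result =>
    let ownerFull := PySem.Str.lower (PySem.Str.strip (pvGetD result "owner_full"))
    let ownerDisplay := PySem.Str.lower (PySem.Str.strip (pvGetD result "owner"))
    if pvAMatch ownerFull ownerDisplay normalizedParticipants then filtered ++ [result]
    else filtered) []

-- ===== PORT B =====
-- `any(owner[i:i+l] in needles for i in range(len(owner)+1) for l in lengths)`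
def pvHits (needles : PySem.Set String) (lengths : PySem.Set Int) (owner : String) : Bool :=
  (PySem.List.pyRange 0 (PySem.Str.len owner + 1) 1).any (fun i =>
    lengths.any (fun l =>
      PySem.Set.contains needles (PySem.Str.slice owner (some i) (some (i + l)))))

def pvBMatches (needles : PySem.Set String) (lengths : PySem.Set Int) (result : List (String × String)) : Bool :=
  pvHits needles lengths (PySem.Str.lower (PySem.Str.strip (pvGetD result "owner_full"))) ||
  pvHits needles lengths (PySem.Str.lower (PySem.Str.strip (pvGetD result "owner")))

def filter_participants_alt (results : List (List (String × String))) (participant_names : List String) : List (List (String × String)) :=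
  let needles := PySem.Set.ofList (participant_names.map (fun name => PySem.Str.strip name))
  let lengths : PySem.Set Int := PySem.Set.ofList (needles.map (fun p => PySem.Str.len p))
  results.filter (fun r => pvBMatches needles lengths r)

-- ===== PRECONDITION & SPEC =====
def Spec_filter_participants (results : List (List (String × String))) (participant_names : List String) (out : List (List (String × String))) : Prop := out = filter_participants_alt results participant_names
instance (results : List (List (String × String))) (participant_names : List String) (out : List (List (String × String))) : Decidable (Spec_filter_participants results participant_names out) := by unfold Spec_filter_participants; infer_instance

-- ===== CLAIM (what is proved, stated in full; the proofs are below) =====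
def Claim_equal_filter_participants : Prop := ∀ (results : List (List (String × String))) (participant_names : List String), Dom_filter_participants results participant_names → Spec_filter_participants results participant_names (filter_participants results participant_names)

-- ===== LEMMAS AND PROOFS =====

theorem pvIsIn_self (s : String) : PySem.Str.isIn s s = true := by
  rw [PySem.Str.isIn_iff_infix]

-- A's inner break-loop over the needles is an `any` of the containment tests
-- (the exact-equality tests are subsumed by containment)
theorem pvAMatch_eq_any (ownerFull ownerDisplay : String) (ps : List String) :
    pvAMatch ownerFull ownerDisplay ps
      = ps.any (fun p => PySem.Str.isIn p ownerFull || PySem.Str.isIn p ownerDisplay) := by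
  induction ps with
  | nil => rfl
  | cons p rest ih =>
      simp only [pvAMatch, List.any_cons]
      cases hof : PySem.Str.isIn p ownerFull with
      | true => simp only [Bool.true_or, Bool.or_true, if_true]
      | false =>
        cases hod : PySem.Str.isIn p ownerDisplay with
        | true => simp only [Bool.true_or, Bool.or_true, if_true]
        | false =>
          have h1 : (p == ownerFull) = false := by
            refine beq_eq_false_iff_ne.mpr (fun hp => ?_)
            rw [hp, pvIsIn_self] at hof
            exact Bool.noConfusion hof
          have h2 : (p == ownerDisplay) = false := by
            refine beq_eq_false_iff_ne.mpr (fun hp => ?_)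
            rw [hp, pvIsIn_self] at hod
            exact Bool.noConfusion hod
          simp only [h1, h2, Bool.false_or, Bool.or_self,
            Bool.false_eq_true, if_false, ih]

-- B's substring-lookup scan hits iff some needle is contained in the owner string,
-- provided `lengths` is nonnegative and covers every needle's length
theorem pvHits_eq_any (needles : PySem.Set String) (lengths : PySem.Set Int)
    (hnn : ∀ l ∈ lengths, 0 ≤ l)
    (hlen : ∀ p ∈ needles, ((p.toList.length : Int)) ∈ lengths) (s : String) :
    pvHits needles lengths s = needles.any (fun p => PySem.Str.isIn p s) := by
  rw [Bool.eq_iff_iff]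
  simp only [pvHits, List.any_eq_true]
  constructor
  · rintro ⟨i, hi, l, hl, hc⟩
    obtain ⟨hi0, -⟩ := PySem.List.mem_pyRange_one.mp hi
    refine ⟨_, (PySem.Set.contains_iff _ _).mp hc, ?_⟩
    rw [PySem.Str.isIn_iff_infix]
    have h0l : (0:Int) ≤ i + l := by have := hnn l hl; omega
    have : (PySem.Str.slice s (some i) (some (i + l))).toList
        = (s.toList.drop i.toNat).take ((i+l).toNat - i.toNat) := by
      simp [PySem.List.slice_toNat _ hi0 h0l]
    rw [this]
    exact (((s.toList.drop i.toNat).take_prefix _).isInfix).trans (s.toList.drop_suffix i.toNat).isInfix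
  · rintro ⟨p, hp, hin⟩
    obtain ⟨pre, suf, hps⟩ := (PySem.Str.isIn_iff_infix _ _).mp hin
    refine ⟨(pre.length : Int), ?_, (p.toList.length : Int), hlen p hp, ?_⟩
    · refine PySem.List.mem_pyRange_one.mpr ⟨by positivity, ?_⟩
      have : pre.length + p.toList.length + suf.length = s.toList.length := by
        rw [← hps]; simp; omega
      simp only [PySem.Str.len_eq]
      omega
    · refine (PySem.Set.contains_iff _ _).mpr ?_
      have : PySem.Str.slice s (some (pre.length : Int)) (some ((pre.length : Int) + (p.toList.length : Int))) = p := by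
        apply String.toList_inj.mp
        have hts : (PySem.Str.slice s (some (pre.length : Int)) (some ((pre.length : Int) + (p.toList.length : Int)))).toList
            = PySem.List.slice s.toList (some (pre.length : Int)) (some ((pre.length : Int) + (p.toList.length : Int))) := by
          simp
        rw [hts, PySem.List.slice_natCast_add, ← hps, List.append_assoc, List.drop_left, List.take_left]
      rw [this]; exact hp

-- `any` distributes over a disjunctive predicate
theorem pvAny_or (l : List String) (p q : String → Bool) :
    (l.any fun x => p x || q x) = (l.any p || l.any q) := by
  induction l with
  | nil => rfl
  | cons x t ih => simp [List.any_cons, ih]; cases p x <;> cases q x <;> simp [Bool.or_comm]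

-- ===== VERDICT (by name: the statement is the Claim_ definition above) =====
theorem filter_participants_spec : Claim_equal_filter_participants := by
  intro results participant_names _
  unfold Spec_filter_participants
  simp only [filter_participants, filter_participants_alt]
  rw [PySem.List.foldl_append_if]
  simp only [List.nil_append, List.map_id']
  apply List.filter_congr
  intro r _
  have hnn : ∀ l ∈ PySem.Set.ofList ((PySem.Set.ofList (participant_names.map (fun name => PySem.Str.strip name))).map (fun p => PySem.Str.len p)), 0 ≤ l := by
    intro l hl
    obtain ⟨p, -, hp⟩ := List.mem_map.mp ((PySem.Set.mem_ofList _ _).mp hl)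
    rw [← hp, PySem.Str.len_eq]
    positivity
  have hlen : ∀ p ∈ PySem.Set.ofList (participant_names.map (fun name => PySem.Str.strip name)), ((p.toList.length : Int)) ∈ PySem.Set.ofList ((PySem.Set.ofList (participant_names.map (fun name => PySem.Str.strip name))).map (fun p => PySem.Str.len p)) := by
    intro p hp
    exact (PySem.Set.mem_ofList _ _).mpr (List.mem_map.mpr ⟨p, hp, (PySem.Str.len_eq p).symm⟩)
  rw [pvAMatch_eq_any, pvBMatches, pvHits_eq_any _ _ hnn hlen, pvHits_eq_any _ _ hnn hlen, ← pvAny_or]
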